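-- pv_equiv track=rewrite | github.com/gougougouz/review-task | 大三下/计算机视觉/代码/temp1.py | max_watered_land
-- ===== SOURCE A (Python) =====
-- def max_watered_land(n, heights):
--     max_watered = 0
--
--     def flow(start):
--         visited = set()
--         stack = [start]
--         while stack:
--             curr = stack.pop()
--             if curr in visited:
--                 continue
--             visited.add(curr)
--             if curr > 0 and heights[curr - 1] <= heights[curr]:
--                 stack.append(curr - 1)
--             if curr < n - 1 and heights[curr + 1] <= heights[curr]:
--                 stack.append(curr + 1)
--         return len(visited)
--
--     for i in range(n):
--         max_watered = max(max_watered, flow(i))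
--
--     return max_watered
-- ===== SOURCE B (Python) =====
-- def max_watered_land(n, heights):
--     # Water poured at i floods exactly a contiguous interval: walk left while
--     # each step down is non-increasing, walk right likewise; no stack / visited set.
--     best = 0
--     for i in range(n):
--         l = i
--         while l > 0 and heights[l - 1] <= heights[l]:
--             l -= 1
--         r = i
--         while r < n - 1 and heights[r + 1] <= heights[r]:
--             r += 1
--         best = max(best, r - l + 1)
--     return best
-- ===== Notes on version B (the rewrite author's own statement) =====
-- stated objective: simpler
-- what changed: Replaces the per-start stack/visited-set flood fill with two direct monotone pointer walks (left and right) per start, using the fact that the watered cells always form a contiguous interval.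
import Mathlib
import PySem

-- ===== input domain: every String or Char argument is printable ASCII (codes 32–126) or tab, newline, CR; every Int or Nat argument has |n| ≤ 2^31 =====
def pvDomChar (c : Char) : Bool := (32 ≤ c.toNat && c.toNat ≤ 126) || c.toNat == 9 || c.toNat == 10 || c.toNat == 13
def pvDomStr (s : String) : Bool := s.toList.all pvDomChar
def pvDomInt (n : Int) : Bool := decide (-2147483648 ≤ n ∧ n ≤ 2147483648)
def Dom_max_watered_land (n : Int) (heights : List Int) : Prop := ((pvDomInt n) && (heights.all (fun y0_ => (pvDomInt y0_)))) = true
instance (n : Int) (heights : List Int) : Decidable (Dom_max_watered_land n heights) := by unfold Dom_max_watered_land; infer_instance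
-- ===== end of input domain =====

-- B replaces A's per-start stack/visited-set flood fill by two direct monotone
-- pointer walks per start (the watered cells form a contiguous interval).

-- ===== PORT A =====
-- Python's `while stack:` loop; `fuel` is only a totality guard (the proof shows it
-- is never exhausted under Pre_). `stack.pop()` pops the TOP, kept at the list head.
def flowLoop (n : Int) (heights : List Int) (fuel : Nat)
    (visited : PySem.Set Int) (stack : List Int) : PySem.Set Int :=
  match fuel with
  | 0 => visited
  | fuel + 1 =>
    match stack with
    | [] => visited
    | curr :: rest =>
      if PySem.Set.contains visited curr then
        flowLoop n heights fuel visited rest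
      else
        -- heights[curr-1] <= heights[curr] etc.: in-range under Pre_ (default 0 unreachable there);
        -- Python appends curr-1 then curr+1, so curr+1 is on top (= list head here)
        flowLoop n heights fuel (PySem.Set.add visited curr)
          ((if curr < n - 1 ∧ PySem.List.pyGetD heights (curr + 1) 0 ≤ PySem.List.pyGetD heights curr 0
            then [curr + 1] else []) ++
           (if 0 < curr ∧ PySem.List.pyGetD heights (curr - 1) 0 ≤ PySem.List.pyGetD heights curr 0
            then [curr - 1] else []) ++ rest)

def flow (n : Int) (heights : List Int) (start : Int) : Int :=
  ((flowLoop n heights (3 * n.toNat + 3) PySem.Set.empty [start]).length : Int)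

def max_watered_land (n : Int) (heights : List Int) : Int :=
  (PySem.List.pyRange 0 n 1).foldl (fun mw i => max mw (flow n heights i)) 0

-- ===== PORT B =====
-- `while l > 0 and heights[l-1] <= heights[l]: l -= 1`
def walkLeft (heights : List Int) (l : Int) : Int :=
  if h : 0 < l ∧ PySem.List.pyGetD heights (l - 1) 0 ≤ PySem.List.pyGetD heights l 0
  then walkLeft heights (l - 1)
  else l
termination_by l.toNat
decreasing_by omega

-- `while r < n - 1 and heights[r+1] <= heights[r]: r += 1`
def walkRight (n : Int) (heights : List Int) (r : Int) : Int :=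
  if h : r < n - 1 ∧ PySem.List.pyGetD heights (r + 1) 0 ≤ PySem.List.pyGetD heights r 0
  then walkRight n heights (r + 1)
  else r
termination_by (n - 1 - r).toNat
decreasing_by omega

def max_watered_land_alt (n : Int) (heights : List Int) : Int :=
  (PySem.List.pyRange 0 n 1).foldl
    (fun best i => max best (walkRight n heights i - walkLeft heights i + 1)) 0

-- ===== PRECONDITION & SPEC =====
-- Pre_ excludes exactly the inputs where Python A raises IndexError: n > len(heights).
def Pre_max_watered_land (n : Int) (heights : List Int) : Prop := n ≤ (heights.length : Int)
instance (n : Int) (heights : List Int) : Decidable (Pre_max_watered_land n heights) := by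
  unfold Pre_max_watered_land; infer_instance

def pvWitness_max_watered_land : Int × List Int := (3, [2, 1, 2])

def Spec_max_watered_land (n : Int) (heights : List Int) (out : Int) : Prop :=
  out = max_watered_land_alt n heights
instance (n : Int) (heights : List Int) (out : Int) : Decidable (Spec_max_watered_land n heights out) := by
  unfold Spec_max_watered_land; infer_instance

-- ===== CLAIM (what is proved, stated in full; the proofs are below) =====
def Claim_equal_max_watered_land : Prop := ∀ (n : Int) (heights : List Int),
  Dom_max_watered_land n heights → Pre_max_watered_land n heights →
  Spec_max_watered_land n heights (max_watered_land n heights)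

-- ===== LEMMAS AND PROOFS =====

-- walkLeft facts
lemma walkLeft_le (heights : List Int) (l : Int) : walkLeft heights l ≤ l := by
  fun_induction walkLeft heights l with
  | case1 l h ih => omega
  | case2 l h => omega

lemma walkLeft_nonneg (heights : List Int) (l : Int) (h0 : 0 ≤ l) : 0 ≤ walkLeft heights l := by
  fun_induction walkLeft heights l with
  | case1 l h ih => exact ih (by omega)
  | case2 l h => omega

lemma walkLeft_step (heights : List Int) (l : Int) :
    ∀ k, walkLeft heights l < k → k ≤ l →
      PySem.List.pyGetD heights (k - 1) 0 ≤ PySem.List.pyGetD heights k 0 := by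
  fun_induction walkLeft heights l with
  | case1 l h ih =>
    intro k hk1 hk2
    rcases eq_or_lt_of_le hk2 with rfl | hlt
    · exact h.2
    · exact ih k hk1 (by omega)
  | case2 l h => intro k hk1 hk2; omega

lemma walkLeft_stop (heights : List Int) (l : Int) :
    ¬(0 < walkLeft heights l ∧
      PySem.List.pyGetD heights (walkLeft heights l - 1) 0 ≤ PySem.List.pyGetD heights (walkLeft heights l) 0) := by
  fun_induction walkLeft heights l with
  | case1 l h ih => exact ih
  | case2 l h => exact h

-- walkRight facts
lemma walkRight_ge (n : Int) (heights : List Int) (r : Int) : r ≤ walkRight n heights r := by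
  fun_induction walkRight n heights r with
  | case1 r h ih => omega
  | case2 r h => omega

lemma walkRight_lt (n : Int) (heights : List Int) (r : Int) (h0 : r ≤ n - 1) :
    walkRight n heights r ≤ n - 1 := by
  fun_induction walkRight n heights r with
  | case1 r h ih => exact ih (by omega)
  | case2 r h => omega

lemma walkRight_step (n : Int) (heights : List Int) (r : Int) :
    ∀ k, r ≤ k → k < walkRight n heights r →
      PySem.List.pyGetD heights (k + 1) 0 ≤ PySem.List.pyGetD heights k 0 := by
  fun_induction walkRight n heights r with
  | case1 r h ih =>
    intro k hk1 hk2
    rcases eq_or_lt_of_le hk1 with rfl | hlt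
    · exact h.2
    · exact ih k (by omega) hk2
  | case2 r h => intro k hk1 hk2; omega

lemma walkRight_stop (n : Int) (heights : List Int) (r : Int) :
    ¬(walkRight n heights r < n - 1 ∧
      PySem.List.pyGetD heights (walkRight n heights r + 1) 0 ≤ PySem.List.pyGetD heights (walkRight n heights r) 0) := by
  fun_induction walkRight n heights r with
  | case1 r h ih => exact ih
  | case2 r h => exact h

-- a Nodup list whose members are exactly an integer interval has its cardinality
lemma length_of_interval (v : List Int) (lo hi : Int) (hnd : v.Nodup)
    (hm : ∀ j, j ∈ v ↔ lo ≤ j ∧ j ≤ hi) : v.length = (hi + 1 - lo).toNat := by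
  have hfs : v.toFinset = Finset.Icc lo hi := by
    ext j
    simp [hm j, Finset.mem_Icc]
  have := List.toFinset_card_of_nodup hnd
  rw [hfs, Int.card_Icc] at this
  omega

-- the invariant of A's flood-fill loop: visited is a sub-interval [lo, hi] of [L, R]
-- around i, stack elements stay within one step of it, and every not-yet-visited
-- cell of [L, R] has a stack witness between i and it
def FloodInv (L R i : Int) (visited stack : List Int) : Prop :=
  (visited = [] ∧ stack = [i]) ∨
    (∃ lo hi, lo ≤ i ∧ i ≤ hi ∧ L ≤ lo ∧ hi ≤ R ∧
      (∀ j, j ∈ visited ↔ lo ≤ j ∧ j ≤ hi) ∧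
      (∀ s ∈ stack, max L (lo - 1) ≤ s ∧ s ≤ min R (hi + 1)) ∧
      (∀ j, L ≤ j → j ≤ R → (lo ≤ j ∧ j ≤ hi) ∨
        ∃ s ∈ stack, ¬(lo ≤ s ∧ s ≤ hi) ∧ min i j ≤ s ∧ s ≤ max i j))

-- the flood-fill loop computes exactly the interval [L, R]
lemma loop_correct (n : Int) (heights : List Int) (L R i : Int)
    (hLi : L ≤ i) (hiR : i ≤ R) (hL0 : 0 ≤ L) (hRn : R ≤ n - 1)
    (hstepL : ∀ k, L < k → k ≤ i → PySem.List.pyGetD heights (k - 1) 0 ≤ PySem.List.pyGetD heights k 0)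
    (hstepR : ∀ k, i ≤ k → k < R → PySem.List.pyGetD heights (k + 1) 0 ≤ PySem.List.pyGetD heights k 0)
    (hstopL : ¬(0 < L ∧ PySem.List.pyGetD heights (L - 1) 0 ≤ PySem.List.pyGetD heights L 0))
    (hstopR : ¬(R < n - 1 ∧ PySem.List.pyGetD heights (R + 1) 0 ≤ PySem.List.pyGetD heights R 0)) :
    ∀ (fuel : Nat) (visited stack : List Int), visited.Nodup →
      FloodInv L R i visited stack →
      3 * ((R + 1 - L).toNat - visited.length) + stack.length < fuel →
      (flowLoop n heights fuel visited stack).Nodup ∧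
        (∀ j, j ∈ flowLoop n heights fuel visited stack ↔ L ≤ j ∧ j ≤ R) := by
  intro fuel
  induction fuel with
  | zero => intro visited stack _ _ hmeas; omega
  | succ fuel ih =>
    intro visited stack hnd hinv hmeas
    cases stack with
    | nil =>
      rcases hinv with ⟨-, hst⟩ | ⟨lo, hi, hloi, hihi, hLlo, hhiR, hmemv, -, hcov⟩
      · exact absurd hst (by simp)
      · have hlo : lo = L := by
          have := hcov L le_rfl (by omega); simp at this; omega
        have hhi : hi = R := by
          have := hcov R (by omega) le_rfl; simp at this; omega
        subst hlo; subst hhi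
        exact ⟨by simpa [flowLoop] using hnd, by intro j; simpa [flowLoop] using hmemv j⟩
    | cons curr rest =>
      by_cases hc : curr ∈ visited
      · -- already visited: pop and continue
        have hstep : flowLoop n heights (fuel + 1) visited (curr :: rest)
            = flowLoop n heights fuel visited rest := by
          simp [flowLoop, hc]
        rw [hstep]
        refine ih visited rest hnd ?_ (by simp at hmeas ⊢; omega)
        rcases hinv with ⟨hv, -⟩ | ⟨lo, hi, hloi, hihi, hLlo, hhiR, hmemv, hstk, hcov⟩
        · subst hv; simp at hc
        · refine Or.inr ⟨lo, hi, hloi, hihi, hLlo, hhiR, hmemv,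
            fun s hs => hstk s (by simp [hs]), ?_⟩
          intro j hLj hjR
          rcases hcov j hLj hjR with hint | ⟨s, hs, hsni, hsb⟩
          · exact Or.inl hint
          · have hsc : s ≠ curr := by
              intro h; subst h; exact hsni ((hmemv s).mp hc)
            rcases List.mem_cons.mp hs with h | h
            · exact absurd h hsc
            · exact Or.inr ⟨s, h, hsni, hsb⟩
      · -- new cell: visit it and push its downhill neighbours
        have hstep : flowLoop n heights (fuel + 1) visited (curr :: rest)
            = flowLoop n heights fuel (visited ++ [curr])
              ((if curr < n - 1 ∧ PySem.List.pyGetD heights (curr + 1) 0 ≤ PySem.List.pyGetD heights curr 0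
                then [curr + 1] else []) ++
               (if 0 < curr ∧ PySem.List.pyGetD heights (curr - 1) 0 ≤ PySem.List.pyGetD heights curr 0
                then [curr - 1] else []) ++ rest) := by
          simp [flowLoop, PySem.Set.add, hc]
        set stk' := (if curr < n - 1 ∧ PySem.List.pyGetD heights (curr + 1) 0 ≤ PySem.List.pyGetD heights curr 0
                then [curr + 1] else []) ++
               (if 0 < curr ∧ PySem.List.pyGetD heights (curr - 1) 0 ≤ PySem.List.pyGetD heights curr 0
                then [curr - 1] else []) ++ rest with hstk'
        have hmem' : ∀ s, s ∈ stk' ↔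
            ((curr < n - 1 ∧ PySem.List.pyGetD heights (curr + 1) 0 ≤ PySem.List.pyGetD heights curr 0) ∧ s = curr + 1) ∨
            ((0 < curr ∧ PySem.List.pyGetD heights (curr - 1) 0 ≤ PySem.List.pyGetD heights curr 0) ∧ s = curr - 1) ∨
            s ∈ rest := by
          intro s; rw [hstk']
          split_ifs with h1 h2 h2 <;> simp [h1, h2]
        have hlen' : stk'.length ≤ rest.length + 2 := by
          rw [hstk']; split_ifs <;> simp
        have hnd' : (visited ++ [curr]).Nodup := by
          rw [List.nodup_append]
          refine ⟨hnd, List.nodup_singleton _, ?_⟩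
          intro a ha b hb
          simp only [List.mem_singleton] at hb
          subst hb
          exact fun h => hc (h ▸ ha)
        rw [hstep]
        -- establish the invariant for the new state
        have hinv' : FloodInv L R i (visited ++ [curr]) stk' ∧
            (R + 1 - L).toNat ≥ (visited ++ [curr]).length ∧ True := by
          rcases hinv with ⟨hv, hst⟩ | ⟨lo, hi, hloi, hihi, hLlo, hhiR, hmemv, hstk, hcov⟩
          · -- first iteration: visited = [], stack = [i]
            simp only [List.cons.injEq] at hst
            obtain ⟨hci, rfl⟩ := hst
            subst hv
            subst hci
            refine ⟨Or.inr ⟨curr, curr, le_rfl, le_rfl, hLi, hiR, ?_, ?_, ?_⟩, by simp; omega, trivial⟩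
            · intro j; simp; omega
            · intro s hs
              rw [hmem' s] at hs
              simp only [max_le_iff, le_min_iff]
              rcases hs with ⟨g, rfl⟩ | ⟨g, rfl⟩ | hs
              · rcases lt_or_eq_of_le hiR with h | h
                · exact ⟨⟨by omega, by omega⟩, by omega, by omega⟩
                · exact absurd (h ▸ g) hstopR
              · rcases lt_or_eq_of_le hLi with h | h
                · exact ⟨⟨by omega, by omega⟩, by omega, by omega⟩
                · exact absurd (h ▸ g) hstopL
              · simp at hs
            · intro j hLj hjR
              rcases lt_trichotomy j curr with hj | rfl | hj
              · refine Or.inr ⟨curr - 1, ?_, by omega, ?_, ?_⟩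
                · exact (hmem' _).mpr (Or.inr (Or.inl ⟨⟨by omega, hstepL curr (by omega) le_rfl⟩, rfl⟩))
                · exact le_trans (min_le_right curr j) (by omega)
                · exact le_trans (by omega) (le_max_left curr j)
              · exact Or.inl ⟨le_rfl, le_rfl⟩
              · refine Or.inr ⟨curr + 1, ?_, by omega, ?_, ?_⟩
                · exact (hmem' _).mpr (Or.inl ⟨⟨by omega, hstepR curr le_rfl (by omega)⟩, rfl⟩)
                · exact le_trans (min_le_left curr j) (by omega)
                · exact le_trans (by omega) (le_max_right curr j)
          · -- general iteration: visited = [lo, hi], curr extends it on one side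
            have hcb := hstk curr (List.mem_cons_self)
            simp only [max_le_iff, le_min_iff] at hcb
            have hnotint : ¬(lo ≤ curr ∧ curr ≤ hi) := fun h => hc ((hmemv curr).mpr h)
            have hvlen : visited.length = (hi + 1 - lo).toNat :=
              length_of_interval visited lo hi hnd hmemv
            have hrest : ∀ s ∈ rest, max L (lo - 1) ≤ s ∧ s ≤ min R (hi + 1) :=
              fun s hs => hstk s (List.mem_cons_of_mem _ hs)
            have hcase : curr = lo - 1 ∨ curr = hi + 1 := by omega
            rcases hcase with hcl | hcr
            · -- curr = lo - 1 : extend to the left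
              refine ⟨Or.inr ⟨lo - 1, hi, by omega, hihi, ?_, hhiR, ?_, ?_, ?_⟩,
                by simp [hvlen]; omega, trivial⟩
              · omega
              · intro j
                rw [List.mem_append, hmemv j]
                simp only [List.mem_singleton]
                omega
              · intro s hs
                rw [hmem' s] at hs
                simp only [max_le_iff, le_min_iff]
                rcases hs with ⟨g, rfl⟩ | ⟨g, rfl⟩ | hs
                · refine ⟨⟨by omega, by omega⟩, by omega, by omega⟩
                · rcases lt_or_eq_of_le (show L ≤ curr by omega) with h | h
                  · exact ⟨⟨by omega, by omega⟩, by omega, by omega⟩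
                  · exact absurd (h ▸ g) hstopL
                · have := hrest s hs
                  simp only [max_le_iff, le_min_iff] at this
                  exact ⟨⟨by omega, by omega⟩, by omega, by omega⟩
              · intro j hLj hjR
                rcases hcov j hLj hjR with hint | ⟨s, hs, hsni, hsb1, hsb2⟩
                · exact Or.inl ⟨by omega, hint.2⟩
                · by_cases hseq : s = curr
                  · subst hseq
                    rcases min_le_iff.mp hsb1 with h | h
                    · omega
                    · -- j ≤ curr = lo - 1; j < lo - 1 needs a further push
                      by_cases hj : j = lo - 1
                      · exact Or.inl ⟨by omega, by omega⟩
                      · refine Or.inr ⟨s - 1, ?_, by omega, ?_, ?_⟩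
                        · refine (hmem' _).mpr (Or.inr (Or.inl ⟨⟨by omega,
                            hstepL s (by omega) (by omega)⟩, rfl⟩))
                        · exact le_trans (min_le_right i j) (by omega)
                        · exact le_trans (by omega) (le_max_left i j)
                  · rcases List.mem_cons.mp hs with h | h
                    · exact absurd h hseq
                    · refine Or.inr ⟨s, (hmem' _).mpr (Or.inr (Or.inr h)), by omega, hsb1, hsb2⟩
            · -- curr = hi + 1 : extend to the right
              refine ⟨Or.inr ⟨lo, hi + 1, hloi, by omega, hLlo, ?_, ?_, ?_, ?_⟩,
                by simp [hvlen]; omega, trivial⟩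
              · omega
              · intro j
                rw [List.mem_append, hmemv j]
                simp only [List.mem_singleton]
                omega
              · intro s hs
                rw [hmem' s] at hs
                simp only [max_le_iff, le_min_iff]
                rcases hs with ⟨g, rfl⟩ | ⟨g, rfl⟩ | hs
                · rcases lt_or_eq_of_le (show curr ≤ R by omega) with h | h
                  · exact ⟨⟨by omega, by omega⟩, by omega, by omega⟩
                  · exact absurd (h ▸ g) hstopR
                · refine ⟨⟨by omega, by omega⟩, by omega, by omega⟩
                · have := hrest s hs
                  simp only [max_le_iff, le_min_iff] at this
                  exact ⟨⟨by omega, by omega⟩, by omega, by omega⟩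
              · intro j hLj hjR
                rcases hcov j hLj hjR with hint | ⟨s, hs, hsni, hsb1, hsb2⟩
                · exact Or.inl ⟨hint.1, by omega⟩
                · by_cases hseq : s = curr
                  · subst hseq
                    rcases le_max_iff.mp hsb2 with h | h
                    · omega
                    · by_cases hj : j = hi + 1
                      · exact Or.inl ⟨by omega, by omega⟩
                      · refine Or.inr ⟨s + 1, ?_, by omega, ?_, ?_⟩
                        · refine (hmem' _).mpr (Or.inl ⟨⟨by omega,
                            hstepR s (by omega) (by omega)⟩, rfl⟩)
                        · exact le_trans (min_le_left i j) (by omega)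
                        · exact le_trans (by omega) (le_max_right i j)
                  · rcases List.mem_cons.mp hs with h | h
                    · exact absurd h hseq
                    · refine Or.inr ⟨s, (hmem' _).mpr (Or.inr (Or.inr h)), by omega, hsb1, hsb2⟩
        refine ih (visited ++ [curr]) stk' hnd' hinv'.1 ?_
        have := hinv'.2.1
        simp only [List.length_append, List.length_cons] at this hmeas ⊢
        omega

lemma flow_eq (n : Int) (heights : List Int) (i : Int) (h0 : 0 ≤ i) (h1 : i < n) :
    flow n heights i = walkRight n heights i - walkLeft heights i + 1 := by
  have hL0 := walkLeft_nonneg heights i h0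
  have hLi := walkLeft_le heights i
  have hiR := walkRight_ge n heights i
  have hRn := walkRight_lt n heights i (by omega)
  obtain ⟨hnd, hmem⟩ := loop_correct n heights (walkLeft heights i) (walkRight n heights i) i
    hLi hiR hL0 hRn (walkLeft_step heights i) (walkRight_step n heights i)
    (walkLeft_stop heights i) (walkRight_stop n heights i)
    (3 * n.toNat + 3) PySem.Set.empty [i] List.nodup_nil (Or.inl ⟨rfl, rfl⟩)
    (by simp [PySem.Set.empty]; omega)
  unfold flow
  rw [length_of_interval _ _ _ hnd hmem]
  omega

-- ===== VERDICT (by name: the statement is the Claim_ definition above) =====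
theorem max_watered_land_spec : Claim_equal_max_watered_land := by
  intro n heights _ _
  unfold Spec_max_watered_land max_watered_land max_watered_land_alt
  apply PySem.List.foldl_congr_mem
  intro acc x hx
  rw [PySem.List.mem_pyRange_one] at hx
  rw [flow_eq n heights x hx.1 hx.2]
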